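-- pv_equiv track=rewrite | github.com/keyvanz0413/Parser_Chunking | legacy/semantic_chunker.py | _is_likely_word
-- ===== SOURCE A (Python) =====
-- def _is_likely_word(word: str) -> bool:
--     """
--     Simple heuristic to check if merged string looks like a valid word.
--
--     This is a lightweight check; for production use, integrate a dictionary.
--     """
--     # Must be alphabetic (allow some internal hyphens for compound words)
--     clean = word.replace('-', '')
--     if not clean.isalpha():
--         return False
--
--     # Shouldn't have too many consecutive consonants or vowels
--     vowels = set('aeiouAEIOU')
--     consonant_run = 0
--     vowel_run = 0
--     max_consonant_run = 0
--     max_vowel_run = 0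
--
--     for char in clean:
--         if char in vowels:
--             vowel_run += 1
--             max_consonant_run = max(max_consonant_run, consonant_run)
--             consonant_run = 0
--         else:
--             consonant_run += 1
--             max_vowel_run = max(max_vowel_run, vowel_run)
--             vowel_run = 0
--
--     max_consonant_run = max(max_consonant_run, consonant_run)
--     max_vowel_run = max(max_vowel_run, vowel_run)
--
--     # Reject if implausible consonant/vowel sequences
--     if max_consonant_run > 5 or max_vowel_run > 4:
--         return False
--
--     return True
-- ===== SOURCE B (Python) =====
-- def _is_likely_word(word: str) -> bool:
--     """Sliding-window re-implementation: instead of tracking running maxima,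
--     reject iff some window of 6 consecutive chars is all consonants or some
--     window of 5 consecutive chars is all vowels."""
--     clean = word.replace('-', '')
--     if not clean.isalpha():
--         return False
--     vowels = set('aeiouAEIOU')
--     n = len(clean)
--     if any(all(c not in vowels for c in clean[i:i + 6]) for i in range(n - 5)):
--         return False
--     if any(all(c in vowels for c in clean[i:i + 5]) for i in range(n - 4)):
--         return False
--     return True
-- ===== Notes on version B (the rewrite author's own statement) =====
-- stated objective: alternative
-- what changed: Replaced the incremental run-counter fold (four counters with resets and running maxima) by a sliding-window existence check: reject iff some 6-char window is all consonants or some 5-char window is all vowels.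
import Mathlib
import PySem

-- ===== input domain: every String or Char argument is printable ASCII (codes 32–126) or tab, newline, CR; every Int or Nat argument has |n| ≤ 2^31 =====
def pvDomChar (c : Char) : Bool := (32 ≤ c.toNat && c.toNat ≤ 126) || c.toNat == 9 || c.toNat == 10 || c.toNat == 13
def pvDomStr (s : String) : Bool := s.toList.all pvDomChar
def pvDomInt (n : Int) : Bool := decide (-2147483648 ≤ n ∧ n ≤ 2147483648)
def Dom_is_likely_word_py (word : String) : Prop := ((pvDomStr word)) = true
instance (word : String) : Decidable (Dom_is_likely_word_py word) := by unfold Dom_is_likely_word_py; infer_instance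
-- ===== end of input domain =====

-- B replaces A's incremental run counters by a sliding-window existence check (alternative decomposition, same cost).

-- ===== PORT A =====
def is_likely_word_py (word : String) : Bool :=
  let clean := PySem.Str.replace word "-" ""
  if !PySem.Str.strIsalpha clean then false
  else
    let vowels : PySem.Set Char := PySem.Set.ofList "aeiouAEIOU".toList
    let st := clean.toList.foldl
      (fun (st : Nat × Nat × Nat × Nat) c =>
        let (cr, vr, mcr, mvr) := st
        if vowels.contains c then
          (0, vr + 1, max mcr cr, mvr)
        else
          (cr + 1, 0, mcr, max mvr vr))
      (0, 0, 0, 0)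
    let mcr := max st.2.2.1 st.1
    let mvr := max st.2.2.2 st.2.1
    if 5 < mcr ∨ 4 < mvr then false else true

-- ===== PORT B =====
def is_likely_word_py_alt (word : String) : Bool :=
  let clean := PySem.Str.replace word "-" ""
  if !PySem.Str.strIsalpha clean then false
  else
    let vowels : PySem.Set Char := PySem.Set.ofList "aeiouAEIOU".toList
    let l := clean.toList
    let n : Int := l.length
    if (PySem.List.pyRange 0 (n - 5) 1).any (fun i =>
        (PySem.List.slice l (some i) (some (i + 6))).all (fun c => !vowels.contains c)) then
      false
    else if (PySem.List.pyRange 0 (n - 4) 1).any (fun i =>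
        (PySem.List.slice l (some i) (some (i + 5))).all (fun c => vowels.contains c)) then
      false
    else
      true

-- ===== PRECONDITION & SPEC =====
def Spec_is_likely_word_py (word : String) (out : Bool) : Prop := out = is_likely_word_py_alt word
instance (word : String) (out : Bool) : Decidable (Spec_is_likely_word_py word out) := by unfold Spec_is_likely_word_py; infer_instance

-- ===== CLAIM (what is proved, stated in full; the proofs are below) =====
def Claim_equal_is_likely_word_py : Prop := ∀ (word : String), Dom_is_likely_word_py word → Spec_is_likely_word_py word (is_likely_word_py word)

-- ===== LEMMAS AND PROOFS =====

-- max length of a block of consecutive p-chars, an initial current-run credit `cur` attached at the front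
def pvMr (p : Char → Bool) (cur : Nat) : List Char → Nat
  | [] => cur
  | c :: t => if p c then pvMr p (cur + 1) t else max cur (pvMr p 0 t)

-- the step function of port A's fold
def pvStep (p : Char → Bool) (st : Nat × Nat × Nat × Nat) (c : Char) : Nat × Nat × Nat × Nat :=
  let (cr, vr, mcr, mvr) := st
  if p c then (0, vr + 1, max mcr cr, mvr) else (cr + 1, 0, mcr, max mvr vr)

theorem pvFold_cons (p : Char → Bool) (l : List Char) : ∀ cr vr mcr mvr : Nat,
    max (l.foldl (pvStep p) (cr, vr, mcr, mvr)).2.2.1 (l.foldl (pvStep p) (cr, vr, mcr, mvr)).1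
      = max mcr (pvMr (fun c => !p c) cr l) := by
  induction l with
  | nil => intro cr vr mcr mvr; simp [pvMr]
  | cons c t ih =>
    intro cr vr mcr mvr
    by_cases h : p c = true
    · simp only [List.foldl_cons, pvStep, h, if_true, pvMr, Bool.not_true,
        Bool.false_eq_true, if_false]
      rw [ih 0 (vr + 1) (max mcr cr) mvr]
      omega
    · simp only [Bool.not_eq_true] at h
      simp only [List.foldl_cons, pvStep, h, Bool.false_eq_true, if_false, pvMr,
        Bool.not_false, if_true]
      rw [ih (cr + 1) 0 mcr (max mvr vr)]

theorem pvFold_vow (p : Char → Bool) (l : List Char) : ∀ cr vr mcr mvr : Nat,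
    max (l.foldl (pvStep p) (cr, vr, mcr, mvr)).2.2.2 (l.foldl (pvStep p) (cr, vr, mcr, mvr)).2.1
      = max mvr (pvMr p vr l) := by
  induction l with
  | nil => intro cr vr mcr mvr; simp [pvMr]
  | cons c t ih =>
    intro cr vr mcr mvr
    by_cases h : p c = true
    · simp only [List.foldl_cons, pvStep, h, if_true, pvMr]
      rw [ih 0 (vr + 1) (max mcr cr) mvr]
    · simp only [Bool.not_eq_true] at h
      simp only [List.foldl_cons, pvStep, h, Bool.false_eq_true, if_false, pvMr]
      rw [ih (cr + 1) 0 mcr (max mvr vr)]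
      omega

theorem pvMr_shift (p : Char → Bool) (l : List Char) :
    ∀ cur, pvMr p cur l = max (cur + (l.takeWhile p).length) (pvMr p 0 l) := by
  induction l with
  | nil => intro cur; simp [pvMr]
  | cons c t ih =>
    intro cur
    by_cases h : p c = true
    · simp only [pvMr, h, if_true, List.takeWhile_cons, List.length_cons]
      rw [ih (cur + 1), ih 1]
      omega
    · simp only [Bool.not_eq_true] at h
      simp only [pvMr, h, Bool.false_eq_true, if_false, List.takeWhile_cons, List.length_nil]
      omega

theorem pvLead_iff (p : Char → Bool) (k : Nat) :
    ∀ l : List Char, (k ≤ l.length ∧ (l.take k).all p = true) ↔ k ≤ (l.takeWhile p).length := by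
  intro l
  induction l generalizing k with
  | nil => cases k <;> simp
  | cons c t ih =>
    cases k with
    | zero => simp
    | succ k =>
      by_cases h : p c = true
      · simp only [List.length_cons, List.take_succ_cons, List.all_cons, h, Bool.true_and,
          List.takeWhile_cons, if_true, Nat.add_le_add_iff_right]
        exact ih k
      · simp only [Bool.not_eq_true] at h
        simp [h]

-- the crux: a window of k consecutive p-chars exists iff the max p-run is ≥ k
theorem pvWindow_iff (p : Char → Bool) (k : Nat) (hk : 1 ≤ k) (l : List Char) :
    (∃ j : Nat, j + k ≤ l.length ∧ ((l.drop j).take k).all p = true) ↔ k ≤ pvMr p 0 l := by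
  induction l with
  | nil => simp [pvMr]
  | cons c t ih =>
    have split : (∃ j : Nat, j + k ≤ (c :: t).length ∧ (((c :: t).drop j).take k).all p = true)
        ↔ ((k ≤ (c :: t).length ∧ ((c :: t).take k).all p = true)
            ∨ ∃ j : Nat, j + k ≤ t.length ∧ ((t.drop j).take k).all p = true) := by
      constructor
      · rintro ⟨j, hj, hall⟩
        cases j with
        | zero => exact Or.inl ⟨by simpa using hj, by simpa using hall⟩
        | succ j => exact Or.inr ⟨j, by simp only [List.length_cons] at hj; omega, by simpa using hall⟩
      · rintro (⟨hlen, hall⟩ | ⟨j, hj, hall⟩)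
        · exact ⟨0, by simpa using hlen, by simpa using hall⟩
        · exact ⟨j + 1, by simp only [List.length_cons]; omega, by simpa using hall⟩
    rw [split, pvLead_iff p k (c :: t), ih]
    by_cases h : p c = true
    · simp only [pvMr, h, if_true, List.takeWhile_cons, List.length_cons]
      rw [pvMr_shift p t 1]
      omega
    · simp only [Bool.not_eq_true] at h
      simp only [pvMr, h, Bool.false_eq_true, if_false, List.takeWhile_cons, List.length_nil]
      omega

-- B's range-over-slices condition is exactly the window existential
theorem pvAny_window (q : Char → Bool) (k m : Nat) (_hk : 1 ≤ k) (hm : (m : Int) = (k : Int) - 1)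
    (l : List Char) :
    ((PySem.List.pyRange 0 ((l.length : Int) - (m : Int)) 1).any (fun i =>
        (PySem.List.slice l (some i) (some (i + (k : Int)))).all q) = true)
      ↔ (∃ j : Nat, j + k ≤ l.length ∧ ((l.drop j).take k).all q = true) := by
  rw [List.any_eq_true]
  constructor
  · rintro ⟨i, hi, hall⟩
    rw [PySem.List.mem_pyRange_one] at hi
    obtain ⟨h0, hlt⟩ := hi
    refine ⟨i.toNat, by omega, ?_⟩
    rw [show i = ((i.toNat : Nat) : Int) by omega,
      show ((i.toNat : Nat) : Int) + (k : Int) = ((i.toNat + k : Nat) : Int) by push_cast; ring,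
      PySem.List.slice_natCast] at hall
    simpa using hall
  · rintro ⟨j, hj, hall⟩
    refine ⟨(j : Int), ?_, ?_⟩
    · rw [PySem.List.mem_pyRange_one]; omega
    · rw [show ((j : Nat) : Int) + (k : Int) = ((j + k : Nat) : Int) by push_cast; ring,
        PySem.List.slice_natCast]
      simpa using hall

-- the two guarded bodies coincide on any character list
theorem pvMain (l : List Char) :
    (let vowels : PySem.Set Char := PySem.Set.ofList "aeiouAEIOU".toList
     let st := l.foldl (pvStep (fun c => vowels.contains c)) (0, 0, 0, 0)
     if 5 < max st.2.2.1 st.1 ∨ 4 < max st.2.2.2 st.2.1 then false else true)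
    = (let vowels : PySem.Set Char := PySem.Set.ofList "aeiouAEIOU".toList
       let n : Int := l.length
       if (PySem.List.pyRange 0 (n - 5) 1).any (fun i =>
           (PySem.List.slice l (some i) (some (i + 6))).all (fun c => !vowels.contains c)) then
         false
       else if (PySem.List.pyRange 0 (n - 4) 1).any (fun i =>
           (PySem.List.slice l (some i) (some (i + 5))).all (fun c => vowels.contains c)) then
         false
       else true) := by
  simp only []
  have e1 := pvFold_cons (fun c => (PySem.Set.ofList "aeiouAEIOU".toList : PySem.Set Char).contains c) l 0 0 0 0
  have e2 := pvFold_vow (fun c => (PySem.Set.ofList "aeiouAEIOU".toList : PySem.Set Char).contains c) l 0 0 0 0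
  simp only [Nat.zero_max] at e1 e2
  have hcons := (pvAny_window (fun c => !(PySem.Set.ofList "aeiouAEIOU".toList : PySem.Set Char).contains c)
      6 5 (by omega) (by norm_num) l).trans
    (pvWindow_iff (fun c => !(PySem.Set.ofList "aeiouAEIOU".toList : PySem.Set Char).contains c) 6 (by omega) l)
  have hvow := (pvAny_window (fun c => (PySem.Set.ofList "aeiouAEIOU".toList : PySem.Set Char).contains c)
      5 4 (by omega) (by norm_num) l).trans
    (pvWindow_iff (fun c => (PySem.Set.ofList "aeiouAEIOU".toList : PySem.Set Char).contains c) 5 (by omega) l)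
  simp only [Nat.cast_ofNat] at hcons hvow
  by_cases hC : 6 ≤ pvMr (fun c => !(PySem.Set.ofList "aeiouAEIOU".toList : PySem.Set Char).contains c) 0 l
  · rw [if_pos (hcons.mpr hC), if_pos (Or.inl (by rw [e1]; omega))]
  · rw [if_neg (fun h => hC (hcons.mp h))]
    by_cases hV : 5 ≤ pvMr (fun c => (PySem.Set.ofList "aeiouAEIOU".toList : PySem.Set Char).contains c) 0 l
    · rw [if_pos (hvow.mpr hV), if_pos (Or.inr (by rw [e2]; omega))]
    · rw [if_neg (fun h => hV (hvow.mp h)), if_neg (by rw [e1, e2]; omega)]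

-- ===== VERDICT (by name: the statement is the Claim_ definition above) =====
set_option maxHeartbeats 1000000 in
theorem is_likely_word_py_spec : Claim_equal_is_likely_word_py := by
  intro word _
  unfold Spec_is_likely_word_py is_likely_word_py is_likely_word_py_alt
  by_cases hg : PySem.Str.strIsalpha (PySem.Str.replace word "-" "") = true
  · simp only [hg, Bool.not_true, Bool.false_eq_true, if_false]
    exact pvMain (PySem.Str.replace word "-" "").toList
  · simp only [Bool.not_eq_true] at hg
    simp only [hg, Bool.not_false, if_true]
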